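-- pv_equiv track=rewrite | github.com/AaliyahSalia/CS350_HW5 | 4.RewriteAlgebraic.py | rewrite_expression
-- ===== SOURCE A (Python) =====
-- def rewrite_expression(expr):
--     stack = []
--     result = ""
--     sign = 1
--
--     for i in range(len(expr)):
--         if expr[i] == '+':
--             result += sign * '+'
--         elif expr[i] == '-':
--             result += sign * '-'
--         elif expr[i] == '(':
--             stack.append(sign)
--             sign = 1
--         elif expr[i] == ')':
--             stack.pop()
--         else:
--             result += sign * expr[i]
--             if len(stack) > 0:
--                 sign = stack[-1]
--
--     return result
-- ===== SOURCE B (Python) =====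
-- def rewrite_expression(expr):
--     return ''.join(c for c in expr if c not in '()')
-- ===== Notes on version B (the rewrite author's own statement) =====
-- stated objective: simpler
-- what changed: A's stateful loop (sign variable, stack of signs, repeated string concatenation) is replaced by a one-line filter join, exploiting that A's sign is provably always 1, so the result is just expr with parentheses removed; Pre_ excludes unbalanced inputs, on which A raises IndexError from stack.pop().
import Mathlib
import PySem

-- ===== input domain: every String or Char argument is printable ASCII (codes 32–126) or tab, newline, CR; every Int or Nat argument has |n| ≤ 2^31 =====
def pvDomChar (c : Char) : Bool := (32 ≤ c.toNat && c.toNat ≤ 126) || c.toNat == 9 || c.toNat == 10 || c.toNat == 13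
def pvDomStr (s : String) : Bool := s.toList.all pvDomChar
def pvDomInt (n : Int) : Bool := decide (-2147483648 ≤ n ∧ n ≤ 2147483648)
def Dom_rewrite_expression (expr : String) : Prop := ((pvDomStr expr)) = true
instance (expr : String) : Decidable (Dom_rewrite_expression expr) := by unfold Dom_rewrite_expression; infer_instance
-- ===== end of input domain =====

-- B replaces A's stateful sign/stack accumulation loop by a one-line parenthesis-removing filter
-- (objective: simpler); on unbalanced input A raises IndexError (excluded by Pre_), B returns a value.

-- ===== PORT A =====
-- loop state: remaining chars, stack (of signs), result so far, current sign.
-- Python's 'sign * c' (int * str) is List.replicate sign.toNat c (negative → empty): exact.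
-- On stack.pop() from an empty stack Python raises IndexError (excluded by Pre_); the port
-- returns the result accumulated so far there.
def pvLoopA : List Char → List Int → List Char → Int → List Char
  | [], _, result, _ => result
  | c :: rest, stack, result, sign =>
    if c = '+' then pvLoopA rest stack (result ++ List.replicate sign.toNat '+') sign
    else if c = '-' then pvLoopA rest stack (result ++ List.replicate sign.toNat '-') sign
    else if c = '(' then pvLoopA rest (stack ++ [sign]) result 1
    else if c = ')' then
      match stack with
      | [] => result      -- Python: IndexError (outside Pre_)
      | _ :: _ => pvLoopA rest stack.dropLast result sign
    else
      pvLoopA rest stack (result ++ List.replicate sign.toNat c)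
        (if stack.length > 0 then (match stack.getLast? with | some s => s | none => sign) else sign)

def rewrite_expression (expr : String) : String :=
  String.mk (pvLoopA expr.toList [] [] 1)

-- ===== PORT B =====
def rewrite_expression_alt (expr : String) : String :=
  String.mk (expr.toList.filter (fun c => !(c == '(' || c == ')')))

-- ===== PRECONDITION & SPEC =====
-- Pre_ holds exactly when every prefix has at least as many '(' as ')': precisely the inputs
-- on which the Python A returns normally (otherwise stack.pop() raises IndexError).
def Pre_rewrite_expression (expr : String) : Prop :=
  ∀ i ∈ List.range (expr.toList.length + 1),
    (expr.toList.take i).count ')' ≤ (expr.toList.take i).count '('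
instance (expr : String) : Decidable (Pre_rewrite_expression expr) := by
  unfold Pre_rewrite_expression; infer_instance
def pvWitness_rewrite_expression : String := "a+(b-(c))"

def Spec_rewrite_expression (expr : String) (out : String) : Prop := out = rewrite_expression_alt expr
instance (expr : String) (out : String) : Decidable (Spec_rewrite_expression expr out) := by unfold Spec_rewrite_expression; infer_instance

-- ===== CLAIM (what is proved, stated in full; the proofs are below) =====
def Claim_equal_rewrite_expression : Prop := ∀ (expr : String), Dom_rewrite_expression expr → Pre_rewrite_expression expr → Spec_rewrite_expression expr (rewrite_expression expr)

-- ===== LEMMAS AND PROOFS =====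

-- unbounded-prefix form of the precondition, relativized to an extra allowance n
def pvBal (l : List Char) (n : Int) : Prop :=
  ∀ i : ℕ, ((l.take i).count ')' : Int) ≤ n + (l.take i).count '('

theorem pvBal_cons {c : Char} {l : List Char} {n : Int} (h : pvBal (c :: l) n) :
    pvBal l (n + (if c = '(' then 1 else 0) - (if c = ')' then 1 else 0)) := by
  intro i
  have h' := h (i + 1)
  simp only [List.take_succ_cons, List.count_cons] at h'
  split_ifs with h1 h2 <;> simp_all <;> omega

theorem pvBal_pos {l : List Char} {n : Int} (h : pvBal (')' :: l) n) : 1 ≤ n := by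
  have := h 1
  simp at this
  omega

theorem pvLoopA_eq (l : List Char) : ∀ (n : ℕ) (result : List Char),
    pvBal l n →
    pvLoopA l (List.replicate n 1) result 1 =
      result ++ l.filter (fun c => !(c == '(' || c == ')')) := by
  induction l with
  | nil => intro n result _; simp [pvLoopA]
  | cons c rest ih =>
    intro n result hbal
    have h' := pvBal_cons hbal
    by_cases hp : c = '+'
    · subst hp
      rw [if_neg (show ('+':Char) ≠ '(' from by decide),
          if_neg (show ('+':Char) ≠ ')' from by decide)] at h'
      simp only [pvLoopA, reduceIte]
      rw [ih n _ (by intro i; have := h' i; push_cast at this ⊢; omega)]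
      simp
    · by_cases hm : c = '-'
      · subst hm
        rw [if_neg (show ('-':Char) ≠ '(' from by decide),
            if_neg (show ('-':Char) ≠ ')' from by decide)] at h'
        show pvLoopA rest (List.replicate n 1) (result ++ List.replicate (1:Int).toNat '-') 1 = _
        rw [ih n _ (by intro i; have := h' i; push_cast at this ⊢; omega)]
        simp
      · by_cases ho : c = '('
        · subst ho
          simp only [reduceIte] at h'
          simp only [pvLoopA, reduceIte]
          rw [show List.replicate n (1 : Int) ++ [1] = List.replicate (n + 1) 1 by
            simp [List.replicate_succ']]
          rw [ih (n + 1) result (by intro i; have := h' i; push_cast at this ⊢; omega)]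
          simp
        · by_cases hc : c = ')'
          · subst hc
            have hn : 1 ≤ (n : Int) := pvBal_pos hbal
            have hn' : 0 < n := by exact_mod_cast hn
            rw [if_neg (show (')':Char) ≠ '(' from by decide)] at h'
            obtain ⟨m, rfl⟩ : ∃ m, n = m + 1 := ⟨n - 1, by omega⟩
            rw [show List.replicate (m + 1) (1 : Int) = 1 :: List.replicate m 1 from rfl]
            simp only [pvLoopA, reduceIte]
            rw [show (1 :: List.replicate m (1:Int)).dropLast = List.replicate m 1 by
              simp [← List.replicate_succ]]
            rw [ih m result (by intro i; have := h' i; simp at this ⊢; push_cast at this ⊢; omega)]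
            simp
          · simp only [if_neg ho, if_neg hc] at h'
            simp only [pvLoopA, if_neg hp, if_neg hm, if_neg ho, if_neg hc]
            have hsign : (if (List.replicate n (1:Int)).length > 0 then
                (match (List.replicate n (1:Int)).getLast? with | some s => s | none => (1:Int))
                else 1) = 1 := by
              cases n <;> simp [List.getLast?_replicate]
            rw [hsign]
            rw [ih n _ (by simpa using h')]
            have hco : (c == '(') = false := by simpa using ho
            have hcc : (c == ')') = false := by simpa using hc
            simp [hco, hcc]

-- ===== VERDICT (by name: the statements are the Claim_ definitions above) =====
theorem rewrite_expression_spec : Claim_equal_rewrite_expression := by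
  intro expr _ hpre
  unfold Spec_rewrite_expression rewrite_expression rewrite_expression_alt
  have hbal : pvBal expr.toList 0 := by
    intro i
    by_cases hi : i ≤ expr.toList.length
    · have := hpre i (by simp only [List.mem_range]; omega)
      push_cast
      omega
    · have := hpre expr.toList.length (by simp)
      rw [List.take_of_length_le (by omega)]
      rw [List.take_length] at this
      push_cast
      omega
  rw [show ([] : List Int) = List.replicate 0 (1:Int) from rfl]
  rw [pvLoopA_eq expr.toList 0 [] (by simpa using hbal)]
  simp
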